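-- pv_equiv track=rewrite | github.com/skyblue030/Dear-Status-Detection | solo_v2/live_program/capture_process.py | classify_differences
-- ===== SOURCE A (Python) =====
-- def classify_differences(differences, low_threshold, high_threshold):
--     state_counts = {"Aggressive": 0, "Normal": 0, "Passive": 0}
--     for diff in differences:
--         if diff is None:
--             continue
--         if diff >= high_threshold:
--             state_counts["Aggressive"] += 1
--
--         elif diff >= low_threshold:
--             state_counts["Normal"] += 1
--         else:
--             state_counts["Passive"] += 1
--
--     total_counts = sum(state_counts.values())
--     if total_counts == 0:
--         return 'Unknown'
--
--     for state, count in state_counts.items():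
--         percentage = (count / total_counts) * 100
--         if percentage > 75:
--             return state
--
--     return 'Normal'  # 如果没有任何状态超过75%，则返回'Normal'
-- ===== SOURCE B (Python) =====
-- def classify_differences(differences, low_threshold, high_threshold):
--     states = []
--     for d in differences:
--         if d is None:
--             continue
--         states.append("Aggressive" if d >= high_threshold
--                       else "Normal" if d >= low_threshold else "Passive")
--     if not states:
--         return 'Unknown'
--     # A state above 75% is a strict majority, and at most one such state can
--     # exist, so the Boyer-Moore majority-vote candidate is the only possible
--     # winner; verify it with a single count.
--     cand, k = None, 0
--     for s in states:
--         if k == 0: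
--             cand, k = s, 1
--         elif s == cand:
--             k += 1
--         else:
--             k -= 1
--     if 4 * states.count(cand) > 3 * len(states):
--         return cand
--     return 'Normal'
-- ===== Notes on version B (the rewrite author's own statement) =====
-- stated objective: alternative
-- what changed: Replaces the three-bucket count-and-compare with a Boyer-Moore majority vote over per-item state labels: since a >75% state is a strict majority and unique, the single vote candidate is verified once with an exact integer test 4*count > 3*total.
import Mathlib
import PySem

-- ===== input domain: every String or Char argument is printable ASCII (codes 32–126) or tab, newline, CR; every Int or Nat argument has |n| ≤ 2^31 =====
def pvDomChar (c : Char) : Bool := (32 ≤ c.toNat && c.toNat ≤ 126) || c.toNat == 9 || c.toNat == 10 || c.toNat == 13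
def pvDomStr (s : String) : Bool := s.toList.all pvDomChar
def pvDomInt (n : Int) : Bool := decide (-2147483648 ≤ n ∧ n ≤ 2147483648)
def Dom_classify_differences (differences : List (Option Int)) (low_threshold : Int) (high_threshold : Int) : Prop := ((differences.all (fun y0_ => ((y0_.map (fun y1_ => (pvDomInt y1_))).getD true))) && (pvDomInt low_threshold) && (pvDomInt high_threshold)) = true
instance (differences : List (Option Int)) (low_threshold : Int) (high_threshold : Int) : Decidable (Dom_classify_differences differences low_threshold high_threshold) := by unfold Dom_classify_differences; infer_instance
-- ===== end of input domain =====

-- B replaces A's three-bucket count-and-compare by a Boyer-Moore majority vote over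
-- per-item state labels (a >75% state is a strict majority and unique, so the vote
-- candidate is the only possible winner, verified once); objective: alternative.
-- Both ports state Python's float test (count/total)*100 > 75 as the exact integer
-- comparison 4*count > 3*total, which is equal for all 0 ≤ count ≤ total here
-- (count/total is a rational with denominator total, and 3/4 is exactly representable,
-- so float rounding cannot cross the threshold).

-- ===== PORT A =====
-- the 'for state, count in state_counts.items()' loop, returning the first state over 75%
def pvFirstOver (items : List (String × Int)) (total : Int) : String :=
  match items with
  | [] => "Normal"
  | (state, count) :: rest =>
      if 4 * count > 3 * total then state else pvFirstOver rest total

def classify_differences (differences : List (Option Int)) (low_threshold : Int) (high_threshold : Int) : String :=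
  let state_counts : PySem.Dict String Int :=
    PySem.Dict.ofList [("Aggressive", 0), ("Normal", 0), ("Passive", 0)]
  let state_counts := differences.foldl (fun d diff =>
    match diff with
    | none => d
    | some v =>
        if v ≥ high_threshold then d.modify "Aggressive" 0 (· + 1)
        else if v ≥ low_threshold then d.modify "Normal" 0 (· + 1)
        else d.modify "Passive" 0 (· + 1)) state_counts
  let total_counts := state_counts.values.sum
  if total_counts = 0 then "Unknown"
  else pvFirstOver state_counts.items total_counts

-- ===== PORT B =====
-- the conditional expression labelling one non-None difference
def pvStateOf (low_threshold high_threshold d : Int) : String :=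
  if d ≥ high_threshold then "Aggressive"
  else if d ≥ low_threshold then "Normal" else "Passive"

-- one step of the Boyer-Moore vote loop (candidate starts as Python's None)
def pvBmStep (st : Option String × Int) (s : String) : Option String × Int :=
  if st.2 = 0 then (some s, 1)
  else if some s = st.1 then (st.1, st.2 + 1)
  else (st.1, st.2 - 1)

def classify_differences_alt (differences : List (Option Int)) (low_threshold : Int) (high_threshold : Int) : String :=
  let states := (differences.filterMap id).map (pvStateOf low_threshold high_threshold)
  if states.isEmpty then "Unknown"
  else
    -- Python's cand is always a string here (states is nonempty, so the first vote
    -- step sets it); getD supplies a default for the unreachable none case only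
    let cand := (states.foldl pvBmStep (none, 0)).1.getD "Normal"
    if 4 * (states.count cand : Int) > 3 * (states.length : Int) then cand else "Normal"

-- ===== PRECONDITION & SPEC =====
def Spec_classify_differences (differences : List (Option Int)) (low_threshold : Int) (high_threshold : Int) (out : String) : Prop := out = classify_differences_alt differences low_threshold high_threshold
instance (differences : List (Option Int)) (low_threshold : Int) (high_threshold : Int) (out : String) : Decidable (Spec_classify_differences differences low_threshold high_threshold out) := by unfold Spec_classify_differences; infer_instance

-- ===== CLAIM (what is proved, stated in full; the proofs are below) =====
def Claim_equal_classify_differences : Prop := ∀ (differences : List (Option Int)) (low_threshold : Int) (high_threshold : Int), Dom_classify_differences differences low_threshold high_threshold → Spec_classify_differences differences low_threshold high_threshold (classify_differences differences low_threshold high_threshold)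

-- ===== LEMMAS AND PROOFS =====

-- literal-dict steps of A's loop
theorem pv_mod_agg (a n p : Int) :
    ((PySem.Dict.mk [("Aggressive", a), ("Normal", n), ("Passive", p)]).modify "Aggressive" 0 (· + 1))
    = PySem.Dict.mk [("Aggressive", a + 1), ("Normal", n), ("Passive", p)] := by
  simp [PySem.Dict.modify, PySem.Dict.insert, PySem.Dict.contains, PySem.Dict.getD, PySem.Dict.get?]

theorem pv_mod_norm (a n p : Int) :
    ((PySem.Dict.mk [("Aggressive", a), ("Normal", n), ("Passive", p)]).modify "Normal" 0 (· + 1))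
    = PySem.Dict.mk [("Aggressive", a), ("Normal", n + 1), ("Passive", p)] := by
  simp [PySem.Dict.modify, PySem.Dict.insert, PySem.Dict.contains, PySem.Dict.getD, PySem.Dict.get?]

theorem pv_mod_pass (a n p : Int) :
    ((PySem.Dict.mk [("Aggressive", a), ("Normal", n), ("Passive", p)]).modify "Passive" 0 (· + 1))
    = PySem.Dict.mk [("Aggressive", a), ("Normal", n), ("Passive", p + 1)] := by
  simp [PySem.Dict.modify, PySem.Dict.insert, PySem.Dict.contains, PySem.Dict.getD, PySem.Dict.get?]

theorem pv_ofList_mk (a n p : Int) :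
    PySem.Dict.ofList [("Aggressive", a), ("Normal", n), ("Passive", p)]
    = PySem.Dict.mk [("Aggressive", a), ("Normal", n), ("Passive", p)] := by
  simp [PySem.Dict.ofList, PySem.Dict.update, PySem.Dict.empty, PySem.Dict.insert,
    PySem.Dict.contains]

-- A's loop keeps the dict as the three fixed keys with running bucket counts.
theorem pv_fold (lo hi : Int) (differences : List (Option Int)) (a n p : Int) :
    (differences.foldl (fun d diff =>
      match diff with
      | none => d
      | some v =>
          if v ≥ hi then d.modify "Aggressive" 0 (· + 1)
          else if v ≥ lo then d.modify "Normal" 0 (· + 1)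
          else d.modify "Passive" 0 (· + 1))
      (PySem.Dict.mk [("Aggressive", a), ("Normal", n), ("Passive", p)]))
    = PySem.Dict.mk
        [("Aggressive", a + (((differences.filterMap id).filter (fun d => d ≥ hi)).length : Int)),
         ("Normal", n + (((differences.filterMap id).filter (fun d => lo ≤ d ∧ d < hi)).length : Int)),
         ("Passive", p + (((differences.filterMap id).filter (fun d => d < hi ∧ d < lo)).length : Int))] := by
  induction differences generalizing a n p with
  | nil => simp
  | cons x xs ih =>
    cases x with
    | none => simpa using ih a n p
    | some v =>
      by_cases hH : hi ≤ v
      · simp only [List.foldl_cons, ge_iff_le]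
        rw [if_pos hH, pv_mod_agg, ih]
        simp [List.filter_cons, hH, show ¬ (lo ≤ v ∧ v < hi) by omega,
          show ¬ (v < hi ∧ v < lo) by omega]
        omega
      · by_cases hL : lo ≤ v
        · simp only [List.foldl_cons, ge_iff_le]
          rw [if_neg hH, if_pos hL, pv_mod_norm, ih]
          simp [List.filter_cons, hH, show lo ≤ v ∧ v < hi by omega,
            show ¬ (v < hi ∧ v < lo) by omega]
          omega
        · simp only [List.foldl_cons, ge_iff_le]
          rw [if_neg hH, if_neg hL, pv_mod_pass, ih]
          simp [List.filter_cons, hH, show ¬ (lo ≤ v ∧ v < hi) by omega,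
            show v < hi ∧ v < lo by omega]
          omega

-- the three buckets partition the non-None diffs
theorem pv_partition (lo hi : Int) (l : List Int) :
    l.length = (l.filter (fun d => d ≥ hi)).length
      + (l.filter (fun d => lo ≤ d ∧ d < hi)).length
      + (l.filter (fun d => d < hi ∧ d < lo)).length := by
  induction l with
  | nil => simp
  | cons v vs ih =>
    by_cases hH : v ≥ hi
    · have h1 : ¬ (lo ≤ v ∧ v < hi) := by omega
      have h2 : ¬ (v < hi ∧ v < lo) := by omega
      simp [List.filter_cons, hH, h1, h2, ih]; omega
    · by_cases hL : v ≥ lo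
      · have h1 : lo ≤ v ∧ v < hi := by omega
        have h2 : ¬ (v < hi ∧ v < lo) := by omega
        simp [List.filter_cons, hH, h1, h2, ih]; omega
      · have h1 : ¬ (lo ≤ v ∧ v < hi) := by omega
        have h2 : v < hi ∧ v < lo := by omega
        simp [List.filter_cons, hH, h1, h2, ih]; omega

-- counting a label in the mapped list = counting the matching bucket
theorem pv_count_map (f : Int → String) (s : String) (l : List Int) :
    ((l.map f).count s : Int) = ((l.filter (fun d => f d = s)).length : Int) := by
  induction l with
  | nil => simp
  | cons x xs ih =>
    by_cases h : f x = s
    · simp [List.count_cons, List.filter_cons, h, ih]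
    · simp [List.count_cons, List.filter_cons, h, Ne.symm h, ih]

-- Boyer-Moore invariant: the final tally is nonnegative and bounds every value's count
theorem pv_bm_inv (l : List String) (c0 : Option String) (k0 : Int) (hk : 0 ≤ k0) :
    0 ≤ (l.foldl pvBmStep (c0, k0)).2 ∧
    ∀ v : String, 2 * (l.count v : Int) + (if some v = c0 then k0 else -k0)
      ≤ (l.length : Int) +
        (if some v = (l.foldl pvBmStep (c0, k0)).1
         then (l.foldl pvBmStep (c0, k0)).2 else -(l.foldl pvBmStep (c0, k0)).2) := by
  induction l generalizing c0 k0 with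
  | nil =>
    refine ⟨hk, fun v => ?_⟩
    simp only [List.foldl_nil, List.count_nil, List.length_nil, Nat.cast_zero]
    split_ifs <;> omega
  | cons x xs ih =>
    by_cases h0 : k0 = 0
    · have hstep : pvBmStep (c0, k0) x = (some x, 1) := by simp [pvBmStep, h0]
      simp only [List.foldl_cons, hstep]
      obtain ⟨hk', hcnt⟩ := ih (some x) 1 (by omega)
      refine ⟨hk', fun v => ?_⟩
      have H := hcnt v
      have hcc : ((x :: xs).count v : Int)
          = (xs.count v : Int) + (if some v = some x then 1 else 0) := by
        by_cases h : v = x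
        · simp [List.count_cons, h]
        · simp [List.count_cons, h, Ne.symm h]
      rw [hcc]
      simp only [List.length_cons, Nat.cast_add, Nat.cast_one]
      by_cases hvx : some v = some x
      · rw [if_pos hvx] at H ⊢
        by_cases hvc : some v = c0
        · rw [if_pos hvc]; omega
        · rw [if_neg hvc]; omega
      · rw [if_neg hvx] at H ⊢
        by_cases hvc : some v = c0
        · rw [if_pos hvc]; omega
        · rw [if_neg hvc]; omega
    · by_cases hx : some x = c0
      · have hstep : pvBmStep (c0, k0) x = (c0, k0 + 1) := by simp [pvBmStep, h0, hx]
        simp only [List.foldl_cons, hstep]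
        obtain ⟨hk', hcnt⟩ := ih c0 (k0 + 1) (by omega)
        refine ⟨hk', fun v => ?_⟩
        have H := hcnt v
        have hcc : ((x :: xs).count v : Int)
            = (xs.count v : Int) + (if some v = some x then 1 else 0) := by
          by_cases h : v = x
          · simp [List.count_cons, h]
          · simp [List.count_cons, h, Ne.symm h]
        rw [hcc]
        simp only [List.length_cons, Nat.cast_add, Nat.cast_one]
        by_cases hvc : some v = c0
        · have hvx : some v = some x := by rw [hx]; exact hvc
          rw [if_pos hvx, if_pos hvc]
          rw [if_pos hvc] at H
          omega
        · have hvx : ¬ some v = some x := by rw [hx]; exact hvc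
          rw [if_neg hvx, if_neg hvc]
          rw [if_neg hvc] at H
          omega
      · have hstep : pvBmStep (c0, k0) x = (c0, k0 - 1) := by simp [pvBmStep, h0, hx]
        simp only [List.foldl_cons, hstep]
        obtain ⟨hk', hcnt⟩ := ih c0 (k0 - 1) (by omega)
        refine ⟨hk', fun v => ?_⟩
        have H := hcnt v
        have hcc : ((x :: xs).count v : Int)
            = (xs.count v : Int) + (if some v = some x then 1 else 0) := by
          by_cases h : v = x
          · simp [List.count_cons, h]
          · simp [List.count_cons, h, Ne.symm h]
        rw [hcc]
        simp only [List.length_cons, Nat.cast_add, Nat.cast_one]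
        by_cases hvc : some v = c0
        · have hvx : ¬ some v = some x := fun h => hx (by rw [← h]; exact hvc)
          rw [if_neg hvx, if_pos hvc]
          rw [if_pos hvc] at H
          omega
        · by_cases hvx : some v = some x
          · rw [if_pos hvx, if_neg hvc]
            rw [if_neg hvc] at H
            omega
          · rw [if_neg hvx, if_neg hvc]
            rw [if_neg hvc] at H
            omega

-- a strict majority is the vote's candidate
theorem pv_bm_major (l : List String) (v : String)
    (h : (l.length : Int) < 2 * (l.count v : Int)) :
    (l.foldl pvBmStep (none, 0)).1 = some v := by
  obtain ⟨hk, hcnt⟩ := pv_bm_inv l none 0 (by omega)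
  have H := hcnt v
  rw [if_neg (by simp : ¬ (some v = (none : Option String)))] at H
  by_cases hc : some v = (l.foldl pvBmStep (none, 0)).1
  · exact hc.symm
  · rw [if_neg hc] at H
    omega

-- the three labels' counts in the mapped list are the three bucket counts
theorem pv_count_agg (lo hi : Int) (l : List Int) :
    (((l.map (pvStateOf lo hi)).count "Aggressive" : Int))
    = ((l.filter (fun d => d ≥ hi)).length : Int) := by
  rw [pv_count_map]
  have he : (fun d => decide (pvStateOf lo hi d = "Aggressive"))
      = (fun d : Int => decide (d ≥ hi)) := by
    funext d
    by_cases hH : hi ≤ d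
    · simp [pvStateOf, hH]
    · by_cases hL : lo ≤ d <;> simp [pvStateOf, hH, hL]
  rw [he]

theorem pv_count_norm (lo hi : Int) (l : List Int) :
    (((l.map (pvStateOf lo hi)).count "Normal" : Int))
    = ((l.filter (fun d => lo ≤ d ∧ d < hi)).length : Int) := by
  rw [pv_count_map]
  have he : (fun d => decide (pvStateOf lo hi d = "Normal"))
      = (fun d : Int => decide (lo ≤ d ∧ d < hi)) := by
    funext d
    by_cases hH : hi ≤ d
    · simp [pvStateOf, hH, show ¬ (lo ≤ d ∧ d < hi) by omega]
    · by_cases hL : lo ≤ d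
      · simp [pvStateOf, hH, hL, show lo ≤ d ∧ d < hi by omega]
      · simp [pvStateOf, hH, hL, show ¬ (lo ≤ d ∧ d < hi) by omega]
  rw [he]

theorem pv_count_pass (lo hi : Int) (l : List Int) :
    (((l.map (pvStateOf lo hi)).count "Passive" : Int))
    = ((l.filter (fun d => d < hi ∧ d < lo)).length : Int) := by
  rw [pv_count_map]
  have he : (fun d => decide (pvStateOf lo hi d = "Passive"))
      = (fun d : Int => decide (d < hi ∧ d < lo)) := by
    funext d
    by_cases hH : hi ≤ d
    · simp [pvStateOf, hH, show ¬ (d < hi ∧ d < lo) by omega]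
    · by_cases hL : lo ≤ d
      · simp [pvStateOf, hH, hL, show ¬ (d < hi ∧ d < lo) by omega]
      · simp [pvStateOf, hH, hL, show d < hi ∧ d < lo by omega]
  rw [he]

-- any other label never occurs
theorem pv_count_other (lo hi : Int) (l : List Int) (s : String)
    (hA : s ≠ "Aggressive") (hN : s ≠ "Normal") (hP : s ≠ "Passive") :
    (((l.map (pvStateOf lo hi)).count s : Int)) = 0 := by
  rw [pv_count_map]
  have : l.filter (fun d => pvStateOf lo hi d = s) = [] := by
    apply List.filter_eq_nil_iff.mpr
    intro d _
    simp only [pvStateOf]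
    split_ifs <;> simp [Ne.symm hA, Ne.symm hN, Ne.symm hP]
  simp [this]

-- ===== VERDICT (by name: the statement is the Claim_ definition above) =====
theorem classify_differences_spec : Claim_equal_classify_differences := by
  intro differences lo hi _
  unfold Spec_classify_differences
  simp only [classify_differences, classify_differences_alt]
  rw [pv_ofList_mk, pv_fold]
  set l := differences.filterMap id with hl
  set a := ((l.filter (fun d => d ≥ hi)).length : Int) with ha
  set n := ((l.filter (fun d => lo ≤ d ∧ d < hi)).length : Int) with hn
  set p := ((l.filter (fun d => d < hi ∧ d < lo)).length : Int) with hp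
  have hpart : (l.length : Int) = a + n + p := by
    have := pv_partition lo hi l
    simp only [ha, hn, hp]; push_cast [this]; ring
  set states := l.map (pvStateOf lo hi) with hstates
  have hslen : (states.length : Int) = (l.length : Int) := by simp [hstates]
  have hca : ((states.count "Aggressive" : Int)) = a := pv_count_agg lo hi l
  have hcn : ((states.count "Normal" : Int)) = n := pv_count_norm lo hi l
  have hcp : ((states.count "Passive" : Int)) = p := pv_count_pass lo hi l
  simp only [PySem.Dict.values, PySem.Dict.items, List.map_cons, List.map_nil, List.sum_cons,
    List.sum_nil, add_zero, zero_add]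
  by_cases h0 : (l.length : Int) = 0
  · rw [if_pos (by omega)]
    have hl0 : l = [] := List.eq_nil_of_length_eq_zero (by omega)
    have hemp : states.isEmpty = true := by rw [hstates, hl0]; rfl
    rw [if_pos hemp]
  · rw [if_neg (by omega)]
    have hne : ¬ states.isEmpty = true := by
      rw [List.isEmpty_iff]
      intro e
      have : (states.length : Int) = 0 := by rw [e]; rfl
      omega
    rw [if_neg hne]
    simp only [pvFirstOver]
    by_cases hA : 4 * a > 3 * (l.length : Int)
    · -- Aggressive wins: it is a strict majority, hence the vote candidate
      have hmaj : (states.length : Int) < 2 * (states.count "Aggressive" : Int) := by omega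
      rw [pv_bm_major states "Aggressive" hmaj, Option.getD_some]
      rw [if_pos (by omega), if_pos (by omega)]
    · rw [if_neg (by omega)]
      by_cases hN : 4 * n > 3 * (l.length : Int)
      · have hmaj : (states.length : Int) < 2 * (states.count "Normal" : Int) := by omega
        rw [pv_bm_major states "Normal" hmaj, Option.getD_some]
        rw [if_pos (by omega), if_pos (by omega)]
      · rw [if_neg (by omega)]
        by_cases hP : 4 * p > 3 * (l.length : Int)
        · have hmaj : (states.length : Int) < 2 * (states.count "Passive" : Int) := by omega
          rw [pv_bm_major states "Passive" hmaj, Option.getD_some]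
          rw [if_pos (by omega), if_pos (by omega)]
        · -- no state above 75%: whatever the candidate is, its count fails the test
          rw [if_neg (by omega)]
          set c := ((states.foldl pvBmStep (none, 0)).1.getD "Normal") with hcdef
          have hcount : 4 * ((states.count c : Int)) ≤ 3 * (states.length : Int) := by
            by_cases e1 : c = "Aggressive"
            · rw [e1]; omega
            · by_cases e2 : c = "Normal"
              · rw [e2]; omega
              · by_cases e3 : c = "Passive"
                · rw [e3]; omega
                · have hz := pv_count_other lo hi l c e1 e2 e3
                  rw [← hstates] at hz
                  omega
          rw [if_neg (by omega)]
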